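-- pv_equiv track=rewrite | github.com/foresense/evolver_tool | main.py | pack_ms_bit
-- ===== SOURCE A (Python) =====
-- def pack_ms_bit(data: list) -> tuple:
--     packed_data = []
--     counter = 0
--     for n, byte in enumerate(data):
--         counter, cycle = divmod(n, 7)
--         ms_bit = byte >> 7
--         # our list is growing from 7 to 8 bytes per packet so we need to count that to be able to update the ms_bits byte
--         ms_bits_index = n + counter - cycle
--         if cycle == 0:
--             packed_data.append(ms_bit)
--             packed_data.append(byte & 0x7F)
--         else:
--             packed_data.append(byte & 0x7F)
--             packed_data[ms_bits_index] = packed_data[ms_bits_index] | (ms_bit << cycle)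
--     return tuple(packed_data)
-- ===== SOURCE B (Python) =====
-- def pack_ms_bit(data: list) -> tuple:
--     # chunk-wise: build the header byte for each group of 7, then emit the payload
--     packed = []
--     i = 0
--     while i < len(data):
--         chunk = data[i:i+7]
--         header = 0
--         j = 0
--         for b in chunk:
--             header |= (b >> 7) << j
--             j += 1
--         packed.append(header)
--         packed.extend(b & 0x7F for b in chunk)
--         i += 7
--     return tuple(packed)
-- ===== Notes on version B (the rewrite author's own statement) =====
-- stated objective: simpler
-- what changed: Replaces the interleaved single pass that appends a provisional header and later backpatches it via a computed index (n + counter - cycle) with a chunk-of-7 decomposition that builds each group's header completely before emitting its payload bytes.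
import Mathlib
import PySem

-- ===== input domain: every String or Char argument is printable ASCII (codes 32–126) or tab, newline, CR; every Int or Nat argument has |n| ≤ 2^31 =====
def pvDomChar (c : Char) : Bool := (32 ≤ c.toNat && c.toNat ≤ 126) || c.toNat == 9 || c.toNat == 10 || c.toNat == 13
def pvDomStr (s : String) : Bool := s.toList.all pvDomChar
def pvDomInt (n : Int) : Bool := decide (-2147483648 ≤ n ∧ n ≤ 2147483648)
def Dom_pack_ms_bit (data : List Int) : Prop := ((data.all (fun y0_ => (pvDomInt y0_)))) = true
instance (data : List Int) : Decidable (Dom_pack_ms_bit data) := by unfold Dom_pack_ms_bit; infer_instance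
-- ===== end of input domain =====

-- B replaces A's interleaved pass with header backpatching by a chunk-of-7 build-header-then-emit-payload decomposition (simpler).


-- ===== PORT A =====
-- the for-loop over enumerate(data), carrying the growing packed list and the index n.
-- ms_bits_index = n + counter - cycle is nonnegative in Python (n = 7*counter + cycle),
-- so Nat subtraction is exact; the index is always < packed.length, so List.modify is
-- exactly Python's in-range item assignment.
def pack_ms_bit_loop (packed : List Int) (n : Nat) (rest : List Int) : List Int :=
  match rest with
  | [] => packed
  | byte :: rest =>
    let counter := n / 7
    let cycle := n % 7
    let ms_bit := byte >>> 7
    let ms_bits_index := n + counter - cycle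
    let packed' :=
      if cycle = 0 then
        (packed ++ [ms_bit]) ++ [PySem.Int.band byte 127]
      else
        (packed ++ [PySem.Int.band byte 127]).modify ms_bits_index
          (fun x => PySem.Int.bor x (ms_bit <<< cycle))
    pack_ms_bit_loop packed' (n + 1) rest

def pack_ms_bit (data : List Int) : List Int :=
  pack_ms_bit_loop [] 0 data

-- ===== PORT B =====
-- inner for-loop of Source B: header |= (b >> 7) << j; j += 1
def packHeader (header : Int) (j : Nat) (chunk : List Int) : Int :=
  match chunk with
  | [] => header
  | b :: bs => packHeader (PySem.Int.bor header ((b >>> 7) <<< j)) (j + 1) bs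

-- while-loop of Source B: i steps by 7; slice out a chunk, append its header then its low bytes
def pack_alt_loop (data : List Int) (packed : List Int) (i : Nat) : List Int :=
  if i < data.length then
    let chunk := PySem.List.slice data (some (i : Int)) (some ((i : Int) + 7))
    pack_alt_loop data
      (packed ++ packHeader 0 0 chunk :: chunk.map (fun b => PySem.Int.band b 127)) (i + 7)
  else packed
termination_by data.length - i
decreasing_by omega

def pack_ms_bit_alt (data : List Int) : List Int :=
  pack_alt_loop data [] 0

-- ===== PRECONDITION & SPEC =====
def Spec_pack_ms_bit (data : List Int) (out : List Int) : Prop := out = pack_ms_bit_alt data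
instance (data : List Int) (out : List Int) : Decidable (Spec_pack_ms_bit data out) := by unfold Spec_pack_ms_bit; infer_instance

-- ===== CLAIM (what is proved, stated in full; the proofs are below) =====
def Claim_equal_pack_ms_bit : Prop := ∀ (data : List Int), Dom_pack_ms_bit data → Spec_pack_ms_bit data (pack_ms_bit data)

-- ===== LEMMAS AND PROOFS =====

-- item assignment at the position right after prefix Q
theorem pv_modify_append (Q : List Int) (h : Int) (T : List Int) (f : Int → Int) :
    (Q ++ h :: T).modify Q.length f = Q ++ f h :: T := by
  induction Q with
  | nil => simp
  | cons q Q ih => simpa using ih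

-- A's loop over an appended list splits at the append
theorem pv_loop_split (xs : List Int) : ∀ (ys P : List Int) (n : Nat),
    pack_ms_bit_loop P n (xs ++ ys)
      = pack_ms_bit_loop (pack_ms_bit_loop P n xs) (n + xs.length) ys := by
  induction xs with
  | nil => intro ys P n; simp [pack_ms_bit_loop]
  | cons x xs ih =>
    intro ys P n
    rw [List.cons_append, pack_ms_bit_loop, pack_ms_bit_loop, ih]
    simp [Nat.add_comm, Nat.add_left_comm]

-- A's loop processes the tail of a chunk (cycles c, c+1, …) by OR-ing into the header at Q.length
theorem pv_loop_chunk (cs : List Int) : ∀ (k c : Nat) (Q T : List Int) (h : Int),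
    1 ≤ c → c + cs.length ≤ 7 → Q.length = 8 * k →
    pack_ms_bit_loop (Q ++ h :: T) (7 * k + c) cs
      = Q ++ packHeader h c cs :: (T ++ cs.map (fun b => PySem.Int.band b 127)) := by
  induction cs with
  | nil => intro k c Q T h _ _ _; simp [pack_ms_bit_loop, packHeader]
  | cons b bs ih =>
    intro k c Q T h hc hle hQ
    have hd : c + bs.length + 1 ≤ 7 := by simpa [Nat.add_comm, Nat.add_left_comm] using hle
    have hcyc : (7 * k + c) % 7 = c := by omega
    have hcnt : (7 * k + c) / 7 = k := by omega
    rw [pack_ms_bit_loop]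
    simp only [hcyc, hcnt]
    rw [if_neg (by omega)]
    have heq : (Q ++ h :: T) ++ [PySem.Int.band b 127] = Q ++ h :: (T ++ [PySem.Int.band b 127]) := by
      simp
    have hidx : 7 * k + c + k - c = Q.length := by omega
    rw [heq, hidx, pv_modify_append]
    have h7 : 7 * k + c + 1 = 7 * k + (c + 1) := by omega
    rw [h7, ih k (c + 1) Q (T ++ [PySem.Int.band b 127]) _ (by omega) (by omega) hQ]
    simp [packHeader]

-- A's loop on the suffix from position 7*k, with headers aligned at multiples of 8, equals B's loop at i = 7*k
theorem pv_loop_outer : ∀ (N : Nat) (data : List Int) (k : Nat) (P : List Int),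
    data.length ≤ 7 * k + N → P.length = 8 * k →
    pack_ms_bit_loop P (7 * k) (data.drop (7 * k)) = pack_alt_loop data P (7 * k) := by
  intro N
  induction N with
  | zero =>
    intro data k P hlen _
    rw [List.drop_eq_nil_of_le (by omega), pack_ms_bit_loop, pack_alt_loop,
      if_neg (by omega)]
  | succ N ih =>
    intro data k P hlen hP
    by_cases h7 : data.length ≤ 7 * k
    · rw [List.drop_eq_nil_of_le (by omega), pack_ms_bit_loop, pack_alt_loop,
        if_neg (by omega)]
    · -- the suffix is nonempty
      rcases List.exists_cons_of_ne_nil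
        (by rw [ne_eq, List.drop_eq_nil_iff]; omega : data.drop (7 * k) ≠ []) with ⟨b, rest0, hrest⟩
      -- B side: the slice data[7k:7k+7] is the chunk b :: rest0.take 6
      have hchunk : PySem.List.slice data (some ((7 * k : Nat) : Int)) (some (((7 * k : Nat) : Int) + 7))
          = b :: rest0.take 6 := by
        have h7c : ((7 * k : Nat) : Int) + 7 = ((7 * k : Nat) : Int) + ((7 : Nat) : Int) := by push_cast; ring
        rw [h7c, PySem.List.slice_natCast_add, hrest]
        simp
      rw [pack_alt_loop, if_pos (by omega), hchunk]
      -- A side: first element of the chunk has cycle 0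
      rw [hrest, pack_ms_bit_loop]
      have hcyc0 : (7 * k) % 7 = 0 := by omega
      simp only [hcyc0, reduceIte]
      conv_lhs => rw [show rest0 = rest0.take 6 ++ rest0.drop 6 by simp]
      rw [pv_loop_split]
      have happ : (P ++ [b >>> 7]) ++ [PySem.Int.band b 127]
          = P ++ (b >>> 7) :: [PySem.Int.band b 127] := by simp
      rw [happ]
      rw [pv_loop_chunk (rest0.take 6) k 1 P [PySem.Int.band b 127] (b >>> 7) (by omega)
            (by have := List.length_take_le 6 rest0; omega) hP]
      simp only [List.singleton_append]
      have hbz : PySem.Int.bor 0 (b >>> 7 <<< (0 : Nat)) = b >>> 7 := by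
        rw [PySem.Int.bor_comm, PySem.Int.bor_zero, Int.shiftLeft_zero]
      have hhdr : packHeader 0 0 (b :: rest0.take 6) = packHeader (b >>> 7) 1 (rest0.take 6) := by
        rw [packHeader, hbz]
      rw [hhdr]
      -- the remainder of the data after this chunk
      have hdd : rest0.drop 6 = data.drop (7 * (k + 1)) := by
        have : (data.drop (7 * k)).drop 7 = data.drop (7 * k + 7) := by
          rw [List.drop_drop]
        rw [hrest] at this
        simpa [show 7 * (k + 1) = 7 * k + 7 by ring] using this
      have hlend : 7 * k < data.length := by omega
      by_cases hlen6 : data.length ≤ 7 * k + 7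
      · -- partial or exactly-final chunk: both loops stop after it
        have hr6 : rest0.drop 6 = [] := by
          rw [hdd, List.drop_eq_nil_iff]; omega
        have hrl : rest0.length ≤ 6 := by
          have := congrArg List.length hrest; simp at this; omega
        rw [hr6, pack_ms_bit_loop, pack_alt_loop, if_neg (by simp; omega)]
        simp
      · -- full chunk: continue at i = 7 * (k + 1) via the induction hypothesis
        have hrl : 6 ≤ rest0.length := by
          have := congrArg List.length hrest; simp at this; omega
        have hcs6 : (rest0.take 6).length = 6 := by simp; omega
        have hn : 7 * k + 1 + (rest0.take 6).length = 7 * (k + 1) := by omega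
        have hlen1 : (P ++ packHeader (b >>> 7) 1 (rest0.take 6) ::
            (PySem.Int.band b 127 :: (rest0.take 6).map (fun b => PySem.Int.band b 127))).length
            = 8 * (k + 1) := by
          simp; omega
        rw [hn, hdd, ih data (k + 1) _ (by omega) hlen1]
        rfl

-- ===== VERDICT (by name: the statement is the Claim_ definition above) =====
theorem pack_ms_bit_spec : Claim_equal_pack_ms_bit := by
  intro data _
  unfold Spec_pack_ms_bit pack_ms_bit pack_ms_bit_alt
  have := pv_loop_outer data.length data 0 [] (by omega) rfl
  simpa using this
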